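-- pv_equiv track=rewrite | github.com/ahn-ji0/algorithm-study-2 | PCCP 모의고사 1회/1.py | solution
-- ===== SOURCE A (Python) =====
-- def solution(input_string):
--     compact = list()
--     alphabet = set(input_string)
--     compact.append(input_string[0])
--     for i in range(1, len(input_string)):
--         if input_string[i] != compact[-1]:
--             compact.append(input_string[i])
--
--     compact.sort()
--
--     answer = ''
--
--     for i in alphabet:
--         if compact.count(i) >= 2:
--             answer += i
--     if answer == '':
--         return "N"
--     return ''.join(sorted(answer))
-- ===== SOURCE B (Python) =====
-- def solution(input_string):
--     # One pass: a char belongs in the answer iff it starts a run while already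
--     # seen in an earlier run (i.e. it has >= 2 runs). No run-compressed list,
--     # no sorting of it, no per-char counting pass.
--     seen = set()
--     repeated = set()
--     prev = None
--     for ch in input_string:
--         if ch != prev:
--             if ch in seen:
--                 repeated.add(ch)
--             seen.add(ch)
--             prev = ch
--     if not repeated:
--         return "N"
--     return ''.join(sorted(repeated))
-- ===== Notes on version B (the rewrite author's own statement) =====
-- stated objective: simpler
-- what changed: Replaces A's build-run-list/sort-it/count-each-alphabet-char pipeline by a single pass that flags a char the moment it starts a run while already seen in an earlier run, so no run-compressed list, no sort of it and no per-char counting pass exist.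
import Mathlib
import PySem

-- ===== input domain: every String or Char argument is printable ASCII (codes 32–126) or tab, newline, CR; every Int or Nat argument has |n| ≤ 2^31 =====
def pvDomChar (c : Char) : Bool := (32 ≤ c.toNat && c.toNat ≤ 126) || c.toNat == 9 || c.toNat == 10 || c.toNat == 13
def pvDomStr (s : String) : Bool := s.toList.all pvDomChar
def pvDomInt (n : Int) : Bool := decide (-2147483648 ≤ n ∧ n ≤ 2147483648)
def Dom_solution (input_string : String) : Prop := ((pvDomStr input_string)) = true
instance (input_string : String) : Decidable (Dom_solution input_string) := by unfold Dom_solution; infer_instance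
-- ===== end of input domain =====

-- B replaces A's run-list/sort/count pipeline by a single pass flagging chars that
-- start a run while already seen (objective: simpler); same return value on Pre_.

-- ===== PORT A =====
def solution (input_string : String) : String :=
  let l := input_string.toList
  let alphabet : PySem.Set Char := PySem.Set.ofList l
  match PySem.List.pyGet? l 0 with
  | none => ""   -- input_string[0] raises IndexError on "" (outside Pre_)
  | some c0 =>
    let compact :=
      (PySem.List.pyRange 1 (PySem.List.len l) 1).foldl
        (fun compact i =>
          if PySem.List.pyGetD l i c0 ≠ PySem.List.pyGetD compact (-1) c0
          then compact ++ [PySem.List.pyGetD l i c0] else compact) [c0]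
    let compactS := PySem.List.sorted compact (fun x => x) false
    let answer := alphabet.foldl
      (fun answer i => if 2 ≤ compactS.count i then answer ++ [i] else answer) ([] : List Char)
    if answer = [] then "N"
    else String.ofList (PySem.List.sorted answer (fun x => x) false)

-- ===== PORT B =====
def solution_alt (input_string : String) : String :=
  let st := input_string.toList.foldl
    (fun (st : PySem.Set Char × PySem.Set Char × Option Char) ch =>
      if some ch ≠ st.2.2 then
        (PySem.Set.add st.1 ch,
         (if PySem.Set.contains st.1 ch then PySem.Set.add st.2.1 ch else st.2.1),
         some ch)
      else st)
    ((PySem.Set.empty : PySem.Set Char), (PySem.Set.empty : PySem.Set Char), (none : Option Char))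
  if st.2.1 = [] then "N"
  else String.ofList (PySem.List.sorted st.2.1 (fun x => x) false)

-- ===== PRECONDITION & SPEC =====
-- A evaluates input_string[0]: the empty string raises IndexError, so it is outside Pre_.
def Pre_solution (input_string : String) : Prop := input_string ≠ ""
instance (input_string : String) : Decidable (Pre_solution input_string) := by unfold Pre_solution; infer_instance
def pvWitness_solution : String := "abacbc"

def Spec_solution (input_string : String) (out : String) : Prop := out = solution_alt input_string
instance (input_string : String) (out : String) : Decidable (Spec_solution input_string out) := by unfold Spec_solution; infer_instance

-- ===== CLAIM (what is proved, stated in full; the proofs are below) =====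
def Claim_equal_solution : Prop := ∀ (input_string : String), Dom_solution input_string → Pre_solution input_string → Spec_solution input_string (solution input_string)

-- ===== LEMMAS AND PROOFS =====

-- A's inner-loop body, as a fold over the characters after position 0
def fA (c0 : Char) (acc : List Char) (c : Char) : List Char :=
  if c ≠ PySem.List.pyGetD acc (-1) c0 then acc ++ [c] else acc

-- B's loop body
def fB (st : PySem.Set Char × PySem.Set Char × Option Char) (ch : Char) :
    PySem.Set Char × PySem.Set Char × Option Char :=
  if some ch ≠ st.2.2 then
    (PySem.Set.add st.1 ch,
     (if PySem.Set.contains st.1 ch then PySem.Set.add st.2.1 ch else st.2.1),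
     some ch)
  else st

-- every element of A's compact list comes from the start value or from the input
theorem subA (c0 : Char) : ∀ (rest acc : List Char) (c : Char),
    c ∈ rest.foldl (fA c0) acc → c ∈ acc ∨ c ∈ rest := by
  intro rest
  induction rest with
  | nil => intro acc c h; exact Or.inl h
  | cons x t ih =>
    intro acc c h
    rcases ih (fA c0 acc x) c h with h' | h'
    · unfold fA at h'
      split at h'
      · rcases List.mem_append.mp h' with h'' | h''
        · exact Or.inl h''
        · simp at h''; subst h''; exact Or.inr (List.mem_cons_self)
      · exact Or.inl h'
    · exact Or.inr (List.mem_cons_of_mem _ h')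

-- loop invariant relating A's run list with B's (seen, repeated, prev) state
theorem inv (c0 : Char) : ∀ (rest acc seen repeated : List Char) (p : Char),
    acc.getLast? = some p → seen.Nodup → repeated.Nodup →
    (∀ c, c ∈ seen ↔ c ∈ acc) → (∀ c, c ∈ repeated ↔ 2 ≤ acc.count c) →
    (rest.foldl (fA c0) acc).getLast? = (rest.foldl fB (seen, repeated, some p)).2.2 ∧
    (rest.foldl fB (seen, repeated, some p)).2.1.Nodup ∧
    (∀ c, c ∈ (rest.foldl fB (seen, repeated, some p)).2.1 ↔ 2 ≤ (rest.foldl (fA c0) acc).count c) := by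
  intro rest
  induction rest with
  | nil =>
    intro acc seen repeated p hlast _ hrn _ hrep
    exact ⟨hlast, hrn, hrep⟩
  | cons x t ih =>
    intro acc seen repeated p hlast hsn hrn hseen hrep
    have hne : acc ≠ [] := by
      intro h; subst h; simp at hlast
    have hgl : PySem.List.pyGetD acc (-1) c0 = p := by
      rw [PySem.List.pyGetD_neg_one acc c0 hne]
      have h2 := List.getLast?_eq_some_getLast (l := acc) hne
      rw [h2] at hlast
      exact Option.some_injective _ hlast
    simp only [List.foldl_cons]
    by_cases hx : x = p
    · have e1 : fA c0 acc x = acc := by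
        unfold fA; rw [hgl, hx]; simp
      have e2 : fB (seen, repeated, some p) x = (seen, repeated, some p) := by
        unfold fB; rw [hx]; simp
      rw [e1, e2]
      exact ih acc seen repeated p hlast hsn hrn hseen hrep
    · have e1 : fA c0 acc x = acc ++ [x] := by
        unfold fA; rw [hgl]; simp [hx]
      have e2 : fB (seen, repeated, some p) x =
          (PySem.Set.add seen x,
           (if PySem.Set.contains seen x then PySem.Set.add repeated x else repeated),
           some x) := by
        unfold fB; simp [hx]
      rw [e1, e2]
      apply ih (acc ++ [x]) (PySem.Set.add seen x) _ x List.getLast?_concat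
        (PySem.Set.nodup_add seen x hsn)
      · split
        · exact PySem.Set.nodup_add repeated x hrn
        · exact hrn
      · intro c
        rw [PySem.Set.mem_add]
        simp [hseen c]
      · intro c
        by_cases hcx : c = x
        · subst hcx
          have hcnt : (acc ++ [c]).count c = acc.count c + 1 := by
            simp [List.count_append]
          rw [hcnt]
          split
          · rename_i hcon
            rw [PySem.Set.mem_add]
            have hmem : c ∈ acc := (hseen c).mp ((PySem.Set.contains_iff seen c).mp hcon)
            have : 0 < acc.count c := List.count_pos_iff.mpr hmem
            constructor
            · intro _; omega
            · intro _; right; rfl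
          · rename_i hcon
            have hnmem : c ∉ acc := fun hm => hcon ((PySem.Set.contains_iff seen c).mpr ((hseen c).mpr hm))
            have : acc.count c = 0 := List.count_eq_zero.mpr hnmem
            rw [hrep c]
            omega
        · have hcnt : (acc ++ [x]).count c = acc.count c := by
            simp [List.count_append, Ne.symm hcx]
          rw [hcnt]
          split
          · rw [PySem.Set.mem_add]
            rw [hrep c]
            simp [hcx]
          · exact hrep c

-- the prop-conditioned append-filter loop (A's answer loop)
theorem foldl_append_ite (p : Char → Prop) [DecidablePred p] :
    ∀ (l acc : List Char),
    l.foldl (fun acc x => if p x then acc ++ [x] else acc) acc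
      = acc ++ l.filter (fun x => decide (p x)) := by
  intro l
  induction l with
  | nil => intro acc; simp
  | cons x t ih =>
    intro acc
    simp only [List.foldl_cons, List.filter_cons]
    by_cases hp : p x
    · simp [hp, ih]
    · simp [hp, ih]

-- ===== VERDICT (by name: the statement is the Claim_ definition above) =====
theorem solution_spec : Claim_equal_solution := by
  intro s _ hpre
  unfold Spec_solution
  have hl : s.toList ≠ [] := by
    intro h
    exact hpre (by rwa [← String.toList_eq_nil_iff])
  obtain ⟨c0, t, hct⟩ : ∃ c0 t, s.toList = c0 :: t := by
    cases h : s.toList with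
    | nil => exact absurd h hl
    | cons a b => exact ⟨a, b, rfl⟩
  unfold solution solution_alt
  simp only [hct, PySem.List.pyGet?_zero_cons]
  -- A's index loop is a fold over the tail characters
  have hAfun : (fun (compact : List Char) (i : Int) =>
      if PySem.List.pyGetD (c0 :: t) i c0 ≠ PySem.List.pyGetD compact (-1) c0
      then compact ++ [PySem.List.pyGetD (c0 :: t) i c0] else compact)
    = (fun compact i => fA c0 compact (PySem.List.pyGetD (c0 :: t) i c0)) := rfl
  rw [hAfun, PySem.List.foldl_pyRange_pyGetD (c0 :: t) c0 (fA c0) [c0] (by norm_num : (0:Int) ≤ 1)]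
  simp only [Int.toNat_one, List.drop_one, List.tail_cons]
  -- B's first step
  have hstep0 : fB (PySem.Set.empty, PySem.Set.empty, none) c0
      = ([c0], [], some c0) := by
    unfold fB; simp [PySem.Set.add, PySem.Set.contains, PySem.Set.empty]
  rw [show (fun (st : PySem.Set Char × PySem.Set Char × Option Char) ch =>
      if some ch ≠ st.2.2 then
        (PySem.Set.add st.1 ch,
         (if PySem.Set.contains st.1 ch then PySem.Set.add st.2.1 ch else st.2.1),
         some ch)
      else st) = fB from rfl]
  rw [List.foldl_cons, hstep0]
  -- apply the invariant
  have H := inv c0 t [c0] [c0] [] c0 (by simp) (by simp) (by simp)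
    (by intro c; simp)
    (by intro c
        simp only [List.not_mem_nil, false_iff, not_le]
        have h := List.count_le_length (l := [c0]) (a := c)
        simp at h
        omega)
  obtain ⟨-, hrn, hrep⟩ := H
  set Afin := t.foldl (fA c0) [c0] with hAfin
  set st := t.foldl fB ([c0], [], some c0) with hst
  -- A's answer loop is a filter of the alphabet
  rw [foldl_append_ite (fun i => 2 ≤ (PySem.List.sorted Afin (fun x => x) false).count i)]
  simp only [List.nil_append]
  set ans := (PySem.Set.ofList (c0 :: t)).filter
      (fun x => decide (2 ≤ (PySem.List.sorted Afin (fun y => y) false).count x)) with hans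
  -- counting in the sorted list = counting in the list
  have hcnt : ∀ c, (PySem.List.sorted Afin (fun y => y) false).count c = Afin.count c := by
    intro c
    exact (PySem.List.sorted_perm Afin (fun y => y) false).count_eq c
  -- membership in the two answer lists coincides
  have hmem : ∀ c, c ∈ ans ↔ c ∈ st.2.1 := by
    intro c
    rw [hans, List.mem_filter, PySem.Set.mem_ofList, hrep c]
    constructor
    · rintro ⟨-, h⟩; rw [hcnt] at h; exact of_decide_eq_true h
    · intro h
      refine ⟨?_, by rw [hcnt]; exact decide_eq_true h⟩
      have hmemA : c ∈ Afin := by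
        have : 0 < Afin.count c := by omega
        exact List.count_pos_iff.mp this
      rcases subA c0 t [c0] c hmemA with h' | h'
      · simp at h'; subst h'; exact List.mem_cons_self
      · exact List.mem_cons_of_mem _ h'
  have hansn : ans.Nodup := List.Nodup.filter _ (PySem.Set.nodup_ofList (c0 :: t))
  -- the two branches
  by_cases he : ans = []
  · have : st.2.1 = [] := by
      rw [List.eq_nil_iff_forall_not_mem]
      intro c hc
      have := (hmem c).mpr hc
      rw [he] at this; simp at this
    simp [he, this]
  · have hne2 : st.2.1 ≠ [] := by
      intro h
      apply he
      rw [List.eq_nil_iff_forall_not_mem]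
      intro c hc
      have := (hmem c).mp hc
      rw [h] at this; simp at this
    simp only [he, hne2]
    have hperm : ans.Perm st.2.1 :=
      (List.perm_ext_iff_of_nodup hansn hrn).mpr hmem
    rw [PySem.List.sorted_eq_sorted_of_perm ans st.2.1 (fun y => y)
      (fun a b h => h) hperm]
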